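-- pv_equiv track=rewrite | github.com/yarnspinnered/epi | epi_judge_python/picking_up_coins.py | maximum_revenue
-- ===== SOURCE A (Python) =====
-- def maximum_revenue(coins):
--     # TODO - you fill in here.
--     cache = [[None for j in range(len(coins) + 1)] for i in  range(len(coins))]
--     prefixes = [0]
--     for i,c in enumerate(coins):
--         prefixes.append(prefixes[-1] + c)
--
--     def helper(i,j):
--         if not cache[i][j] is None:
--             return cache[i][j]
--         if i == j - 1:
--             cache[i][j] = coins[i]
--             return coins[i]
--         pick_right = coins[j - 1] + prefixes[j - 1] - prefixes[i] - helper(i, j - 1)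
--         pick_left = coins[i] + prefixes[j] - prefixes[i + 1] - helper(i + 1, j)
--         if pick_left > pick_right:
--             cache[i][j] = pick_left
--         else:
--             cache[i][j] = pick_right
--         return cache[i][j]
--
--     return helper(0, len(coins))
-- ===== SOURCE B (Python) =====
-- def maximum_revenue(coins):
--     n = len(coins)
--     prefixes = [0]
--     for c in coins:
--         prefixes.append(prefixes[-1] + c)
--     dp = {}
--     for i in range(n):
--         dp[(i, i + 1)] = coins[i]
--     for gap in range(2, n + 1):
--         for i in range(n - gap + 1):
--             j = i + gap
--             dp[(i, j)] = max(coins[i] + prefixes[j] - prefixes[i + 1] - dp[(i + 1, j)],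
--                              coins[j - 1] + prefixes[j - 1] - prefixes[i] - dp[(i, j - 1)])
--     return dp[(0, n)]
-- ===== Notes on version B (the rewrite author's own statement) =====
-- stated objective: alternative
-- what changed: replaces the memoized top-down recursion over (i,j) with an explicit bottom-up dict-based table filled in order of increasing interval length (gap), using max() instead of the branch-and-cache
-- outside the precondition, e.g. on maximum_revenue([]): A raises IndexError, B raises KeyError
import Mathlib
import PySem

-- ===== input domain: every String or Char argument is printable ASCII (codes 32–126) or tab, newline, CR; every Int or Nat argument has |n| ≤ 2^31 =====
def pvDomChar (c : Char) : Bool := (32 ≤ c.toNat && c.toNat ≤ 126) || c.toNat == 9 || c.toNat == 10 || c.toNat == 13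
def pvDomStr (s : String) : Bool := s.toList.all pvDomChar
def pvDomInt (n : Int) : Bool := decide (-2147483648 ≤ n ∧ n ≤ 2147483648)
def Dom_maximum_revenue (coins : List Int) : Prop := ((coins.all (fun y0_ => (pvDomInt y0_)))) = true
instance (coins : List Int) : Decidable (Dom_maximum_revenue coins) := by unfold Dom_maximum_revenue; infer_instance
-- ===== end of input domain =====

-- B replaces A's memoized top-down recursion by a bottom-up dict table filled in order of
-- increasing interval length (same recurrence, explicit iteration); equivalence of return values.

-- ===== PORT A =====
-- prefixes = [0]; for c in coins: prefixes.append(prefixes[-1] + c)   (shared by both Pythons)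
def pvPrefixes (coins : List Int) : List Int :=
  coins.foldl (fun p c => p ++ [(PySem.List.pyGet? p (-1)).getD 0 + c]) [0]

-- the inner 'helper(i, j)'; the Python cache is pure memoization of these same values, so the
-- port is the recursion itself (exact on every state helper(0, n) reaches: 0 ≤ i < j ≤ n, all
-- list indices in range); the 'j ≤ i' guard only totalizes states Python never reaches.
def pvHelper (coins pre : List Int) (i j : Nat) : Int :=
  if _h1 : j ≤ i then 0
  else if _h2 : i = j - 1 then coins.getD i 0
  else
    let pick_right := coins.getD (j - 1) 0 + pre.getD (j - 1) 0 - pre.getD i 0 -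
      pvHelper coins pre i (j - 1)
    let pick_left := coins.getD i 0 + pre.getD j 0 - pre.getD (i + 1) 0 -
      pvHelper coins pre (i + 1) j
    if pick_left > pick_right then pick_left else pick_right
termination_by j - i
decreasing_by all_goals omega

def maximum_revenue (coins : List Int) : Int :=
  pvHelper coins (pvPrefixes coins) 0 coins.length

-- ===== PORT B =====
-- for i in range(n): dp[(i, i+1)] = coins[i]
def pvBase (coins : List Int) (n : Nat) : PySem.Dict (Nat × Nat) Int :=
  (List.range n).foldl (fun d i => d.insert (i, i + 1) (coins.getD i 0)) PySem.Dict.empty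

-- body of the inner 'for i in range(n - gap + 1)' loop (j = i + gap); in-range dict lookups,
-- getD 0 only totalizes keys the loop order guarantees are present
def pvStep (coins pre : List Int) (gap : Nat) (d : PySem.Dict (Nat × Nat) Int) (i : Nat) :
    PySem.Dict (Nat × Nat) Int :=
  d.insert (i, i + gap)
    (max (coins.getD i 0 + pre.getD (i + gap) 0 - pre.getD (i + 1) 0 - d.getD (i + 1, i + gap) 0)
         (coins.getD (i + gap - 1) 0 + pre.getD (i + gap - 1) 0 - pre.getD i 0 -
           d.getD (i, i + gap - 1) 0))

-- one iteration of 'for gap in range(2, n + 1)'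
def pvOuter (coins pre : List Int) (n : Nat) (d : PySem.Dict (Nat × Nat) Int) (gap : Nat) :
    PySem.Dict (Nat × Nat) Int :=
  (List.range (n - gap + 1)).foldl (pvStep coins pre gap) d

def maximum_revenue_alt (coins : List Int) : Int :=
  let n := coins.length
  let pre := pvPrefixes coins
  ((List.range' 2 (n - 1)).foldl (pvOuter coins pre n) (pvBase coins n)).getD (0, n) 0

-- ===== PRECONDITION & SPEC =====
-- Pre_ excludes only [], on which A raises IndexError (and B raises KeyError).
def Pre_maximum_revenue (coins : List Int) : Prop := coins ≠ []
instance (coins : List Int) : Decidable (Pre_maximum_revenue coins) := by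
  unfold Pre_maximum_revenue; infer_instance

def pvWitness_maximum_revenue : List Int := [5, 25, 10, 1]

def Spec_maximum_revenue (coins : List Int) (out : Int) : Prop := out = maximum_revenue_alt coins
instance (coins : List Int) (out : Int) : Decidable (Spec_maximum_revenue coins out) := by
  unfold Spec_maximum_revenue; infer_instance

-- ===== CLAIM =====
def Claim_equal_maximum_revenue : Prop :=
  ∀ (coins : List Int), Dom_maximum_revenue coins → Pre_maximum_revenue coins →
    Spec_maximum_revenue coins (maximum_revenue coins)

-- ===== LEMMAS AND PROOFS =====
theorem pvHelper_base (coins pre : List Int) (i : Nat) :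
    pvHelper coins pre i (i + 1) = coins.getD i 0 := by
  rw [pvHelper]; simp

theorem pvHelper_step (coins pre : List Int) (i j : Nat) (h : i + 2 ≤ j) :
    pvHelper coins pre i j =
      max (coins.getD i 0 + pre.getD j 0 - pre.getD (i + 1) 0 - pvHelper coins pre (i + 1) j)
          (coins.getD (j - 1) 0 + pre.getD (j - 1) 0 - pre.getD i 0 -
            pvHelper coins pre i (j - 1)) := by
  rw [pvHelper]
  rw [dif_neg (by omega), dif_neg (by omega)]
  dsimp only []
  rw [max_def]
  split_ifs <;> omega

theorem pv_inner (coins pre : List Int) (n gap m : Nat) (hgap : 2 ≤ gap)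
    (hm : m + gap ≤ n + 1) (d : PySem.Dict (Nat × Nat) Int)
    (hd : ∀ i j, i < j → j ≤ n → j - i < gap → d.getD (i, j) 0 = pvHelper coins pre i j) :
    ∀ i j, i < j → j ≤ n → (j - i < gap ∨ (j - i = gap ∧ i < m)) →
      ((List.range m).foldl (pvStep coins pre gap) d).getD (i, j) 0 = pvHelper coins pre i j := by
  induction m generalizing d with
  | zero =>
    intro i j hij hjn hcase
    simp only [List.range_zero, List.foldl_nil]
    exact hd i j hij hjn (by omega)
  | succ m ih =>
    intro i j hij hjn hcase
    rw [List.range_succ, List.foldl_append, List.foldl_cons, List.foldl_nil]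
    set D := (List.range m).foldl (pvStep coins pre gap) d with hD
    have ihfull : ∀ i j, i < j → j ≤ n → (j - i < gap ∨ (j - i = gap ∧ i < m)) →
        D.getD (i, j) 0 = pvHelper coins pre i j := by
      intro i j h1 h2 h3
      rw [hD]
      exact ih (by omega) d hd i j h1 h2 h3
    unfold pvStep
    rw [ihfull (m + 1) (m + gap) (by omega) (by omega) (Or.inl (by omega)),
        ihfull m (m + gap - 1) (by omega) (by omega) (Or.inl (by omega)),
        ← pvHelper_step coins pre m (m + gap) (by omega),
        PySem.Dict.getD_insert]
    by_cases hk : (i, j) = (m, m + gap)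
    · rw [if_pos hk]
      obtain ⟨h1, h2⟩ := Prod.mk.injEq .. ▸ hk
      subst h1; subst h2; rfl
    · rw [if_neg hk]
      apply ihfull i j hij hjn
      rcases hcase with h | ⟨h1, h2⟩
      · exact Or.inl h
      · refine Or.inr ⟨h1, ?_⟩
        rcases Nat.lt_or_ge i m with h' | h'
        · exact h'
        · exfalso; apply hk
          have hi : i = m := by omega
          subst hi
          have hj : j = i + gap := by omega
          subst hj; rfl

theorem pv_base (coins : List Int) (n m : Nat) (hm : m ≤ n) :
    ∀ i j, i < j → j ≤ n → j - i = 1 → i < m →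
      ((List.range m).foldl (fun d i => d.insert (i, i + 1) (coins.getD i 0))
        PySem.Dict.empty).getD (i, j) 0 = pvHelper coins (pvPrefixes coins) i j := by
  induction m with
  | zero => intro i j _ _ _ h; omega
  | succ m ih =>
    intro i j hij hjn hgap him
    rw [List.range_succ, List.foldl_append, List.foldl_cons, List.foldl_nil,
        PySem.Dict.getD_insert]
    by_cases hk : (i, j) = (m, m + 1)
    · rw [if_pos hk]
      obtain ⟨h1, h2⟩ := Prod.mk.injEq .. ▸ hk
      subst h1; subst h2
      rw [pvHelper_base]
    · rw [if_neg hk]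
      apply ih (by omega) i j hij hjn hgap
      have : ¬(i = m ∧ j = m + 1) := by
        intro ⟨a, b⟩; apply hk; subst a; subst b; rfl
      omega

theorem pv_outer (coins pre : List Int) (n s c : Nat) (hs : 1 ≤ s) (hsc : s + c ≤ n)
    (d : PySem.Dict (Nat × Nat) Int)
    (hd : ∀ i j, i < j → j ≤ n → j - i ≤ s → d.getD (i, j) 0 = pvHelper coins pre i j) :
    ∀ i j, i < j → j ≤ n → j - i ≤ s + c →
      ((List.range' (s + 1) c).foldl (pvOuter coins pre n) d).getD (i, j) 0
        = pvHelper coins pre i j := by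
  induction c generalizing s d with
  | zero =>
    intro i j h1 h2 h3
    simpa using hd i j h1 h2 (by omega)
  | succ c ih =>
    intro i j h1 h2 h3
    rw [List.range'_succ, List.foldl_cons]
    have hstep : ∀ i j, i < j → j ≤ n → j - i ≤ s + 1 →
        (pvOuter coins pre n d (s + 1)).getD (i, j) 0 = pvHelper coins pre i j := by
      intro i j h1 h2 h3
      unfold pvOuter
      apply pv_inner coins pre n (s + 1) (n - (s + 1) + 1) (by omega) (by omega) d
        (fun i j a b c => hd i j a b (by omega))
      · exact h1
      · exact h2
      · rcases Nat.lt_or_ge (j - i) (s + 1) with h | h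
        · exact Or.inl h
        · exact Or.inr ⟨by omega, by omega⟩
    have := ih (s + 1) (by omega) (by omega) (pvOuter coins pre n d (s + 1)) hstep i j h1 h2
      (by omega)
    simpa [Nat.add_assoc] using this
  
-- ===== VERDICT =====
theorem maximum_revenue_spec : Claim_equal_maximum_revenue := by
  intro coins _ hpre
  unfold Spec_maximum_revenue maximum_revenue maximum_revenue_alt
  have hn : 1 ≤ coins.length := by
    cases coins with
    | nil => exact absurd rfl hpre
    | cons a l => simp
  have hbase : ∀ i j, i < j → j ≤ coins.length → j - i ≤ 1 →
      (pvBase coins coins.length).getD (i, j) 0 = pvHelper coins (pvPrefixes coins) i j := by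
    intro i j h1 h2 h3
    exact pv_base coins coins.length coins.length le_rfl i j h1 h2 (by omega) (by omega)
  have := pv_outer coins (pvPrefixes coins) coins.length 1 (coins.length - 1) le_rfl (by omega)
    (pvBase coins coins.length) hbase 0 coins.length hn le_rfl (by omega)
  simpa using this.symm
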